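-- pv_equiv track=rewrite | github.com/SouzaCadu/guppe | Secao_13_Lista_Ex_29e/valida_cadastro.py | valida_telefone
-- ===== SOURCE A (Python) =====
-- def valida_telefone(telefone):
--     """
--     Recebe uma string e verifica se há caracteres inválidos
--     :param telefone: Qualquer string que represente um telefone
--     :return: True se contiver apenas caracteres válidos, False do contrário
--     """
--
--     caracteres_validos = ["0", "1", "2", "3", "4", "5", "6", "7", "8", "9", " ",
--                           "+", "(", ")", "-"]
--
--     try:
--         valido = False
--         for caractere in str(telefone):
--             if str(caractere) in caracteres_validos:
--                 valido = True
--             else: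
--                 valido = False
--                 break
--         return valido
--
--     except AttributeError:
--         return False
--     except ValueError:
--         return False
-- ===== SOURCE B (Python) =====
-- def valida_telefone(telefone):
--     """
--     Recebe uma string e verifica se ha caracteres invalidos
--     :param telefone: Qualquer string que represente um telefone
--     :return: True se contiver apenas caracteres validos, False do contrario
--     """
--     s = str(telefone)
--     valid_chars = set("0123456789 +()-")
--     return len(s) > 0 and set(s) <= valid_chars
-- ===== Notes on version B (the rewrite author's own statement) =====
-- stated objective: idiomatic
-- what changed: Replaces the flag-and-break character scan with building the set of distinct characters once and a single subset comparison against the allowed-character set, guarded by a non-empty check.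
import Mathlib
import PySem

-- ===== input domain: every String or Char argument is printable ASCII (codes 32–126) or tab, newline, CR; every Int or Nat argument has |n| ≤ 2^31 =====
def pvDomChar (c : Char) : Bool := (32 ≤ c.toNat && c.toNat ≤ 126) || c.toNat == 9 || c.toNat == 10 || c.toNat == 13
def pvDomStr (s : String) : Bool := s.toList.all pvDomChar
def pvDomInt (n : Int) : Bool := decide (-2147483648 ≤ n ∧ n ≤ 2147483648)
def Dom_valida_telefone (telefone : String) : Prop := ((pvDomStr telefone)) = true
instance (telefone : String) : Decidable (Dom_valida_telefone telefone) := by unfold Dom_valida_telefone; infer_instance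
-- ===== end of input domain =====

-- B replaces the flag-and-break character scan by building the set of distinct characters once and one subset test against the allowed-character set (idiomatic; guarded by a non-empty check).
-- ===== PORT A =====
def caracteres_validos : List String := ["0", "1", "2", "3", "4", "5", "6", "7", "8", "9", " ",
                                         "+", "(", ")", "-"]

def valida_telefone_loop (valido : Bool) : List Char → Bool
  | [] => valido
  | c :: cs =>
    if caracteres_validos.contains (String.ofList [c]) then valida_telefone_loop true cs
    else false

def valida_telefone (telefone : String) : Bool :=
  valida_telefone_loop false telefone.toList

-- ===== PORT B =====
def valid_chars : PySem.Set Char := PySem.Set.ofList "0123456789 +()-".toList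

def valida_telefone_alt (telefone : String) : Bool :=
  decide (0 < PySem.Str.len telefone) &&
    PySem.Set.issubset (PySem.Set.ofList telefone.toList) valid_chars

-- ===== PRECONDITION & SPEC =====
def Spec_valida_telefone (telefone : String) (out : Bool) : Prop := out = valida_telefone_alt telefone
instance (telefone : String) (out : Bool) : Decidable (Spec_valida_telefone telefone out) := by unfold Spec_valida_telefone; infer_instance

-- ===== CLAIM (what is proved, stated in full; the proofs are below) =====
def Claim_equal_valida_telefone : Prop := ∀ (telefone : String), Dom_valida_telefone telefone → Spec_valida_telefone telefone (valida_telefone telefone)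

-- ===== LEMMAS AND PROOFS =====

-- ===== VERDICT (by name: the statement is the Claim_ definition above) =====
lemma toList_mk (l : List Char) : (String.ofList l).toList = l := (String.ofList_eq.mp rfl).symm

lemma mk_inj {c d : Char} (h : String.ofList [c] = String.ofList [d]) : c = d := by
  have h2 := congrArg String.toList h
  rw [toList_mk, toList_mk] at h2
  exact (List.cons_eq_cons.mp h2).1

lemma mk_mem_map (c : Char) (ds : List Char) :
    (String.ofList [c] ∈ ds.map (fun d => String.ofList [d])) ↔ c ∈ ds := by
  rw [List.mem_map]
  constructor
  · rintro ⟨d, hd, he⟩; exact (mk_inj he.symm) ▸ hd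
  · intro h; exact ⟨c, h, rfl⟩

lemma contains_char (c : Char) :
    caracteres_validos.contains (String.ofList [c]) = PySem.Set.contains valid_chars c := by
  have h0 : valid_chars = ['0','1','2','3','4','5','6','7','8','9',' ','+','(',')','-'] := by decide
  have h1 : caracteres_validos
      = (['0','1','2','3','4','5','6','7','8','9',' ','+','(',')','-']).map (fun d => String.ofList [d]) := by
    decide
  simp only [h0, h1, PySem.Set.contains, List.contains_eq_mem, decide_eq_decide]
  exact mk_mem_map c _

lemma loop_true (cs : List Char) :
    valida_telefone_loop true cs = cs.all (PySem.Set.contains valid_chars) := by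
  induction cs with
  | nil => rfl
  | cons c cs ih =>
    simp only [valida_telefone_loop, contains_char, List.all_cons]
    cases h : PySem.Set.contains valid_chars c
    · simp
    · simp [ih]

lemma issubset_ofList (l : List Char) :
    PySem.Set.issubset (PySem.Set.ofList l) valid_chars = l.all (PySem.Set.contains valid_chars) := by
  simp only [PySem.Set.issubset]
  rw [Bool.eq_iff_iff]
  simp only [List.all_eq_true]
  constructor
  · intro h x hx; exact h x ((PySem.Set.mem_ofList l x).mpr hx)
  · intro h x hx; exact h x ((PySem.Set.mem_ofList l x).mp hx)

theorem valida_telefone_spec : Claim_equal_valida_telefone := by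
  intro telefone _
  unfold Spec_valida_telefone valida_telefone valida_telefone_alt
  rw [issubset_ofList]
  cases hl : telefone.toList with
  | nil => simp [valida_telefone_loop, PySem.Str.len_eq, hl]
  | cons c cs =>
    simp only [valida_telefone_loop, contains_char, loop_true, PySem.Str.len_eq, hl, List.all_cons]
    cases h : PySem.Set.contains valid_chars c <;> simp
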